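-- pv_equiv track=rewrite | github.com/sban2009/Code4Fun | matrix-diagonal-lexicographic.py | solution
-- ===== SOURCE A (Python) =====
-- def repeat(s, n):
--     """Method to expand a string to a given required length, e.g.
--     s="ab", n=5 will result in "ababa", i.e. ab repeated 6 times,
--     then trimmed to 5 characters
--
--     Args:
--         s (string): given string
--         n (int): required length to be attained
--
--     Returns:
--         string: expanded string of length n
--     """
--     return (s * (n // len(s) + 1))[:n]
--
-- def solution(matrix):
--     l = len(matrix[0])
--     # diagonal number list
--     diag = [i for i in range(1, 2 * l)]
--     # list of letters in each diagonal
--     st = ["" for i in range(2 * l - 1)]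
--     k = 0
--
--     # lower triangle
--     # w/ main diagonal
--     for r in range(l - 1, -1, -1):
--         i, j = r, 0
--         while i < l and j < l:
--             st[k] += matrix[i][j]
--             i += 1
--             j += 1
--         k += 1
--
--     # upper triangle
--     for c in range(1, l):
--         i, j = 0, c
--         while i < l and j < l:
--             st[k] += matrix[i][j]
--             i += 1
--             j += 1
--         k += 1
--
--     d = dict()
--     for i in range(len(diag)):
--         d[diag[i]] = repeat(st[i], l)
--
--     # sort the dictionary -> make a list of keys
--     ans = dict(sorted(d.items(), key=lambda item: item[1])).keys()
--
--     return list(ans)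
-- ===== SOURCE B (Python) =====
-- def solution(matrix):
--     l = len(matrix[0])
--     # single row-major pass dropping each cell into its diagonal bucket (diagonal d = l - (i - j))
--     parts = [[] for _ in range(2 * l - 1)]
--     for i in range(l):
--         for j in range(l):
--             parts[l - 1 - i + j].append(matrix[i][j])
--     strs = ["".join(p) for p in parts]
--
--     def less(a, b):
--         # compares repeat(strs[a-1], l) < repeat(strs[b-1], l) lazily by cyclic indexing,
--         # without building the repeated keys
--         sa, sb = strs[a - 1], strs[b - 1]
--         for p in range(l):
--             ca, cb = sa[p % len(sa)], sb[p % len(sb)]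
--             if ca != cb:
--                 return ca < cb
--         return False
--
--     # stable insertion sort of the diagonal numbers (ties keep ascending number)
--     order = []
--     for d in range(1, 2 * l):
--         k = 0
--         while k < len(order) and not less(d, order[k]):
--             k += 1
--         order.insert(k, d)
--     return order
-- ===== Notes on version B (the rewrite author's own statement) =====
-- stated objective: alternative
-- what changed: B replaces A's two triangle walks and key-decorated dict sort by a single row-major pass that drops every cell into its diagonal bucket, and then stable-insertion-sorts the diagonal numbers with a lazy comparator that compares the length-l repeated keys character by character via cyclic indexing (p % len(s)), never materialising the repeated strings or any dict.
import Mathlib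
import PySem

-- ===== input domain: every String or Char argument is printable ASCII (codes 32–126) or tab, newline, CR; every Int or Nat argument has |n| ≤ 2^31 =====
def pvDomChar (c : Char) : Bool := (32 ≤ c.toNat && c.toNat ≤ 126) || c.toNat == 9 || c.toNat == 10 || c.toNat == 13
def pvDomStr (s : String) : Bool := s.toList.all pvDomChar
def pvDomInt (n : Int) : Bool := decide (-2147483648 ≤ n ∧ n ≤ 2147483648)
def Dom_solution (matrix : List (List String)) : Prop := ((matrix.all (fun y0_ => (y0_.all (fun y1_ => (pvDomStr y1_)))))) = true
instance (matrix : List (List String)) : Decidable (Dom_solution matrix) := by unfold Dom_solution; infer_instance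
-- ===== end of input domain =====

-- B replaces A's two triangle walks and dict round-trip by one row-major bucket pass over all
-- cells plus a stable insertion sort of the diagonal numbers whose comparator reads the repeated
-- keys lazily by cyclic indexing (objective: alternative; return value only, no mutation).

-- ===== PORT A =====
-- repeat(s, n) = (s * (n // len(s) + 1))[:n]  (Pre_ keeps s nonempty wherever it is called)
def pvRepeat (s : List Char) (n : Int) : List Char :=
  PySem.List.slice (PySem.List.pyRepeat s (PySem.Int.floordiv n (PySem.List.len s) + 1)) none (some n)

-- matrix[i][j] as both sources access it; the defaults are never reached under Pre_ (out of range raises in Python)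
def pvCell (matrix : List (List String)) (i j : Int) : List Char :=
  (PySem.List.pyGetD (PySem.List.pyGetD matrix i []) j "").toList

-- A's 'while i < l and j < l: st[k] += matrix[i][j]; i += 1; j += 1'
def pvWalk (matrix : List (List String)) (l i j : Int) (acc : List Char) : List Char :=
  if _h : i < l ∧ j < l then pvWalk matrix l (i + 1) (j + 1) (acc ++ pvCell matrix i j) else acc
termination_by (l - i).toNat
decreasing_by omega

def solution (matrix : List (List String)) : List Int :=
  let l : Int := PySem.List.len (PySem.List.pyGetD matrix 0 [])
  let diag : List Int := PySem.List.pyRange 1 (2 * l) 1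
  -- st[k], written once per k in A's two loops (lower triangle with main diagonal, then upper)
  let st : List (List Char) :=
    (PySem.List.pyRange (l - 1) (-1) (-1)).map (fun r => pvWalk matrix l r 0 []) ++
    (PySem.List.pyRange 1 l 1).map (fun c => pvWalk matrix l 0 c [])
  -- for i in range(len(diag)): d[diag[i]] = repeat(st[i], l)
  let d : PySem.Dict Int (List Char) :=
    (PySem.List.pyRange 0 (PySem.List.len diag) 1).foldl
      (fun acc i => acc.insert (PySem.List.pyGetD diag i 0) (pvRepeat (PySem.List.pyGetD st i []) l))
      PySem.Dict.empty
  -- list(dict(sorted(d.items(), key=lambda item: item[1])).keys())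
  (PySem.Dict.ofList (PySem.List.sorted d.items (fun item => item.2) false)).keys

-- ===== PORT B =====
-- B's 'for p in range(l): ca, cb = sa[p % len(sa)], sb[p % len(sb)]; if ca != cb: return ca < cb'
-- (the early return makes the loop a recursion; ' ' defaults are never reached under Pre_)
def pvLessAux (sa sb : List Char) (l p : Int) : Bool :=
  if _h : p < l then
    let ca := PySem.List.pyGetD sa (PySem.Int.mod p (PySem.List.len sa)) ' '
    let cb := PySem.List.pyGetD sb (PySem.Int.mod p (PySem.List.len sb)) ' '
    if ca ≠ cb then decide (ca < cb) else pvLessAux sa sb l (p + 1)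
  else false
termination_by (l - p).toNat
decreasing_by omega

-- less(a, b) of B
def pvLess (strs : List (List Char)) (l a b : Int) : Bool :=
  pvLessAux (PySem.List.pyGetD strs (a - 1) []) (PySem.List.pyGetD strs (b - 1) []) l 0

def solution_alt (matrix : List (List String)) : List Int :=
  let l : Int := PySem.List.len (PySem.List.pyGetD matrix 0 [])
  -- parts = [[] for _ in range(2*l-1)]; for i in range(l): for j in range(l): parts[l-1-i+j].append(matrix[i][j])
  let parts : List (List (List Char)) :=
    (PySem.List.pyRange 0 l 1).foldl (fun P i =>
      (PySem.List.pyRange 0 l 1).foldl (fun Q j =>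
        PySem.List.pySetD Q (l - 1 - i + j)
          (PySem.List.pyGetD Q (l - 1 - i + j) [] ++ [pvCell matrix i j])) P)
      (List.replicate (2 * l - 1).toNat [])
  -- strs = ["".join(p) for p in parts]
  let strs : List (List Char) := parts.map (PySem.Chars.join [])
  -- the 'k += 1' scan followed by order.insert(k, d) places d before the first x with less(d, x)
  (PySem.List.pyRange 1 (2 * l) 1).foldl
    (fun ord d => PySem.List.insertBy (fun a b => pvLess strs l a b) d ord) []

-- ===== PRECONDITION & SPEC =====
-- Pre_ excludes exactly the inputs on which Python A raises: the empty matrix (IndexError on matrix[0]),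
-- matrices whose first l rows / row lengths do not cover the l×l square A indexes (IndexError), and
-- matrices with some all-empty-strings diagonal (repeat divides by len("") : ZeroDivisionError).
def Pre_solution (matrix : List (List String)) : Prop :=
  matrix ≠ [] ∧
  (matrix.headD []).length ≤ matrix.length ∧
  (∀ row ∈ matrix.take (matrix.headD []).length, (matrix.headD []).length ≤ row.length) ∧
  (∀ k ∈ List.range (2 * (matrix.headD []).length - 1),
    ∃ i ∈ List.range (matrix.headD []).length, ∃ j ∈ List.range (matrix.headD []).length,
      (i : Int) - (j : Int) = ((matrix.headD []).length : Int) - ((k : Int) + 1) ∧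
      (matrix.getD i []).getD j "" ≠ "")
instance (matrix : List (List String)) : Decidable (Pre_solution matrix) := by
  unfold Pre_solution; infer_instance

def pvWitness_solution : List (List String) := [["a", "b"], ["c", "d"]]

def Spec_solution (matrix : List (List String)) (out : List Int) : Prop := out = solution_alt matrix
instance (matrix : List (List String)) (out : List Int) : Decidable (Spec_solution matrix out) := by
  unfold Spec_solution; infer_instance

-- ===== CLAIM (what is proved, stated in full; the proofs are below) =====
def Claim_equal_solution : Prop := ∀ (matrix : List (List String)), Dom_solution matrix → Pre_solution matrix → Spec_solution matrix (solution matrix)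

-- ===== LEMMAS AND PROOFS =====

-- the cells of diagonal d, top to bottom, and their concatenation
def pvDiagCells (matrix : List (List String)) (l d : Int) : List (List Char) :=
  (PySem.List.pyRange (max 0 (l - d)) (min l (2 * l - d)) 1).map (fun i => pvCell matrix i (i - (l - d)))

def pvDiagStr (matrix : List (List String)) (l d : Int) : List Char :=
  (pvDiagCells matrix l d).flatten

-- ---------- A side: solution = sorted(range(1, 2l), key = repeat(diagStr, l)) ----------

-- "".join with empty separator is flatten
theorem pvJoin_nil (ps : List (List Char)) : PySem.Chars.join [] ps = ps.flatten := by
  simp only [PySem.Chars.join, List.intercalate]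
  induction ps with
  | nil => rfl
  | cons a t ih =>
    cases t with
    | nil => simp
    | cons b t' => simpa [List.intersperse] using ih

-- A's while loop along diagonal d, started anywhere, is the flattened comprehension from there
theorem pvWalk_spec (matrix : List (List String)) (l d : Int) :
    ∀ (n : Nat) (i : Int) (acc : List Char), (l - i).toNat = n →
      pvWalk matrix l i (i - (l - d)) acc =
        acc ++ ((PySem.List.pyRange i (min l (2 * l - d)) 1).map
          (fun t => pvCell matrix t (t - (l - d)))).flatten := by
  intro n
  induction n with
  | zero =>
    intro i acc h
    rw [pvWalk, dif_neg (by omega : ¬ (i < l ∧ i - (l - d) < l)),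
      PySem.List.pyRange_one_eq_nil (by omega)]
    simp
  | succ n ih =>
    intro i acc h
    rw [pvWalk]
    by_cases hc : i < l ∧ i - (l - d) < l
    · rw [dif_pos hc, show i - (l - d) + 1 = (i + 1) - (l - d) from by ring,
        ih (i + 1) (acc ++ pvCell matrix i (i - (l - d))) (by omega),
        PySem.List.pyRange_one_cons (show i < min l (2 * l - d) by omega)]
      simp
    · rw [dif_neg hc, PySem.List.pyRange_one_eq_nil (by omega)]
      simp

-- folding 'acc.insert k v' over fresh, pairwise-distinct keys appends the pairs to the items
theorem pvFoldInsert_items (ps : List (Int × List Char)) :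
    ∀ (d : PySem.Dict Int (List Char)),
      (∀ p ∈ ps, d.contains p.1 = false) → (ps.map Prod.fst).Nodup →
      (ps.foldl (fun a p => a.insert p.1 p.2) d).items = d.items ++ ps := by
  induction ps with
  | nil => intro d _ _; simp
  | cons p t ih =>
    intro d hfresh hnodup
    simp only [List.foldl_cons]
    rw [ih (d.insert p.1 p.2)
        (by
          intro q hq
          rw [PySem.Dict.contains_insert]
          have h1 : q.1 ≠ p.1 := by
            have := (List.nodup_cons.mp hnodup).1
            intro he
            exact this (he ▸ List.mem_map_of_mem hq)
          simp [h1, hfresh q (List.mem_cons_of_mem _ hq)])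
        ((List.nodup_cons.mp hnodup).2),
      PySem.Dict.items_insert_of_not_contains d p.2 (hfresh p (List.mem_cons_self))]
    simp

theorem pvInsertBy_map {α β : Type} (f : α → β) (p : β → β → Bool) (x : α) :
    ∀ ys : List α,
      PySem.List.insertBy p (f x) (ys.map f) =
        (PySem.List.insertBy (fun a b => p (f a) (f b)) x ys).map f := by
  intro ys
  induction ys with
  | nil => rfl
  | cons y t ih =>
    simp only [List.map_cons, PySem.List.insertBy]
    by_cases hb : p (f x) (f y)
    · simp [hb]
    · simp [hb, ih]

-- sorting a mapped list by key = mapping the list sorted by the composed key (same stable sort)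
theorem pvSorted_map {α β κ : Type} [LT κ] [DecidableLT κ] (f : α → β) (key : β → κ)
    (xs : List α) :
    PySem.List.sorted (xs.map f) key false =
      (PySem.List.sorted xs (fun x => key (f x)) false).map f := by
  rw [PySem.List.sorted_eq_foldl_insertBy, PySem.List.sorted_eq_foldl_insertBy, List.foldl_map]
  have main : ∀ (ys : List α) (acc : List α),
      List.foldl (fun a x => PySem.List.insertBy (fun u v => decide (key u < key v)) (f x) a)
        (acc.map f) ys =
      (List.foldl (fun a x =>
        PySem.List.insertBy (fun u v => decide (key (f u) < key (f v))) x a) acc ys).map f := by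
    intro ys
    induction ys with
    | nil => intro acc; rfl
    | cons y t ih =>
      intro acc
      simp only [List.foldl_cons, pvInsertBy_map f (fun u v => decide (key u < key v)) y acc]
      exact ih _
  simpa using main xs []

theorem pvWalk_lower (matrix : List (List String)) (l d : Int) (h2 : d ≤ l) :
    pvWalk matrix l (l - d) 0 [] = pvDiagStr matrix l d := by
  have h := pvWalk_spec matrix l d (l - (l - d)).toNat (l - d) [] rfl
  rw [show (l - d) - (l - d) = (0 : Int) from by ring] at h
  rw [h, pvDiagStr, pvDiagCells, show max 0 (l - d) = l - d from by omega]
  simp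

theorem pvWalk_upper (matrix : List (List String)) (l d : Int) (_h1 : l < d) :
    pvWalk matrix l 0 (d - l) [] = pvDiagStr matrix l d := by
  have h := pvWalk_spec matrix l d (l - 0).toNat 0 [] rfl
  rw [show (0 : Int) - (l - d) = d - l from by ring] at h
  rw [h, pvDiagStr, pvDiagCells, show max 0 (l - d) = 0 from by omega]
  simp

-- A's two triangle passes produce exactly the diagonal strings, for d = 1, …, 2l-1 in order
theorem pvSt (matrix : List (List String)) (L : Nat) :
    List.map (fun r => pvWalk matrix (L:Int) r 0 []) (PySem.List.pyRange ((L:Int) - 1) (-1) (-1)) ++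
      List.map (fun c => pvWalk matrix (L:Int) 0 c []) (PySem.List.pyRange 1 (L:Int)) =
    (List.range (2 * L - 1)).map (fun k : Nat => pvDiagStr matrix (L:Int) (1 + (k:Int))) := by
  rw [PySem.List.pyRange_neg_one, PySem.List.pyRange_one, List.map_map, List.map_map,
    show ((L:Int) - 1 - -1).toNat = L from by omega,
    show ((L:Int) - 1).toNat = L - 1 from by omega,
    show 2 * L - 1 = L + (L - 1) from by omega,
    List.range_add, List.map_append, List.map_map]
  congr 1
  · apply List.map_congr_left
    intro k hk
    have hkL : k < L := List.mem_range.mp hk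
    show pvWalk matrix (L:Int) ((L:Int) - 1 - (k:Int)) 0 [] = pvDiagStr matrix (L:Int) (1 + (k:Int))
    rw [show ((L:Int) - 1 - (k:Int)) = (L:Int) - (1 + (k:Int)) from by ring]
    exact pvWalk_lower matrix (L:Int) (1 + (k:Int)) (by omega)
  · apply List.map_congr_left
    intro k hk
    show pvWalk matrix (L:Int) 0 (1 + (k:Int)) [] = pvDiagStr matrix (L:Int) (1 + ((L + k : Nat):Int))
    rw [show ((1:Int) + (k:Int)) = (1 + ((L + k : Nat):Int)) - (L:Int) from by push_cast; ring]
    exact pvWalk_upper matrix (L:Int) (1 + ((L + k : Nat):Int)) (by push_cast; omega)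

-- the whole pipeline of A equals the named sorted form
theorem pvA_eq (matrix : List (List String)) :
    solution matrix =
      PySem.List.sorted (PySem.List.pyRange 1 (2 * PySem.List.len (PySem.List.pyGetD matrix 0 [])) 1)
        (fun d => pvRepeat (pvDiagStr matrix (PySem.List.len (PySem.List.pyGetD matrix 0 [])) d)
          (PySem.List.len (PySem.List.pyGetD matrix 0 []))) false := by
  unfold solution
  simp only [PySem.List.len_eq]
  set L : Nat := (PySem.List.pyGetD matrix 0 []).length with hL
  rw [pvSt matrix L, PySem.List.length_pyRange_one,
    show ((2 * (L:Int) - 1).toNat) = 2 * L - 1 from by omega,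
    PySem.List.pyRange_zero_nat, List.foldl_map]
  have hcongr : ∀ (acc : PySem.Dict Int (List Char)), ∀ k ∈ List.range (2 * L - 1),
      acc.insert (PySem.List.pyGetD (PySem.List.pyRange 1 (2 * (L:Int))) (k : Int) 0)
        (pvRepeat (PySem.List.pyGetD
          (List.map (fun k : Nat => pvDiagStr matrix (L:Int) (1 + (k:Int))) (List.range (2 * L - 1)))
          (k : Int) []) (L:Int)) =
      acc.insert ((1:Int) + (k:Int)) (pvRepeat (pvDiagStr matrix (L:Int) (1 + (k:Int))) (L:Int)) := by
    intro acc k hk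
    have hk' : k < 2 * L - 1 := List.mem_range.mp hk
    rw [PySem.List.pyGetD_natCast, PySem.List.pyGetD_natCast,
      List.getD_eq_getElem _ _ (by rw [PySem.List.length_pyRange_one]; omega),
      List.getD_eq_getElem _ _ (by simpa using hk'),
      PySem.List.getElem_pyRange_one, List.getElem_map, List.getElem_range]
  rw [PySem.List.foldl_congr_mem _ _ _ _ hcongr]
  have hps : List.foldl
      (fun (acc : PySem.Dict Int (List Char)) (k : Nat) => acc.insert ((1:Int) + (k:Int))
        (pvRepeat (pvDiagStr matrix (L:Int) (1 + (k:Int))) (L:Int)))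
      PySem.Dict.empty (List.range (2 * L - 1)) =
    List.foldl (fun a (p : Int × List Char) => a.insert p.1 p.2) PySem.Dict.empty
      ((List.range (2 * L - 1)).map (fun k : Nat =>
        (((1:Int) + (k:Int)), pvRepeat (pvDiagStr matrix (L:Int) (1 + (k:Int))) (L:Int)))) :=
    (List.foldl_map (f := fun k : Nat =>
        (((1:Int) + (k:Int)), pvRepeat (pvDiagStr matrix (L:Int) (1 + (k:Int))) (L:Int)))
      (g := fun a (p : Int × List Char) => a.insert p.1 p.2)
      (l := List.range (2 * L - 1)) (init := PySem.Dict.empty)).symm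
  rw [hps, pvFoldInsert_items _ PySem.Dict.empty (fun p _ => PySem.Dict.contains_empty p.1)
    (by rw [List.map_map]
        exact (List.nodup_range).map (fun a b hab => by simpa using hab))]
  rw [show (PySem.Dict.empty : PySem.Dict Int (List Char)).items = [] from rfl, List.nil_append]
  rw [show List.map (fun k : Nat => (((1:Int) + (k:Int)),
        pvRepeat (pvDiagStr matrix (L:Int) (1 + (k:Int))) (L:Int))) (List.range (2 * L - 1)) =
      List.map (fun dd : Int => (dd, pvRepeat (pvDiagStr matrix (L:Int) dd) (L:Int)))
        (List.map (fun k : Nat => ((1:Int) + (k:Int))) (List.range (2 * L - 1))) from by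
    rw [List.map_map]; rfl]
  rw [pvSorted_map (fun dd : Int => (dd, pvRepeat (pvDiagStr matrix (L:Int) dd) (L:Int)))
    (fun p : Int × List Char => p.2)]
  rw [show ∀ ys : List (Int × List Char), PySem.Dict.ofList ys =
      List.foldl (fun a p => a.insert p.1 p.2) PySem.Dict.empty ys from fun _ => rfl]
  rw [show ∀ d : PySem.Dict Int (List Char), d.keys = d.items.map (·.1) from fun _ => rfl]
  have hnodup2 : (List.map Prod.fst (List.map
      (fun dd : Int => (dd, pvRepeat (pvDiagStr matrix (L:Int) dd) (L:Int)))
      (PySem.List.sorted (List.map (fun k : Nat => ((1:Int) + (k:Int))) (List.range (2 * L - 1)))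
        (fun x : Int => (x, pvRepeat (pvDiagStr matrix (L:Int) x) (L:Int)).2) false))).Nodup := by
    rw [List.map_map,
      show ((Prod.fst ∘ fun dd : Int => (dd, pvRepeat (pvDiagStr matrix (L:Int) dd) (L:Int)))) =
        (fun dd : Int => dd) from rfl, List.map_id']
    exact (PySem.List.sorted_perm _ _ _).nodup_iff.mpr
      ((List.nodup_range).map (fun a b hab => by simpa using hab))
  rw [pvFoldInsert_items _ PySem.Dict.empty (fun p _ => PySem.Dict.contains_empty p.1) hnodup2,
    show (PySem.Dict.empty : PySem.Dict Int (List Char)).items = [] from rfl, List.nil_append,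
    List.map_map,
    show (((fun x : Int × List Char => x.1) ∘
      fun dd : Int => (dd, pvRepeat (pvDiagStr matrix (L:Int) dd) (L:Int)))) =
        (fun dd : Int => dd) from rfl,
    List.map_id',
    PySem.List.pyRange_one 1 (2 * (L:Int)),
    show ((2 * (L:Int) - 1).toNat) = 2 * L - 1 from by omega]

-- ---------- B side ----------

-- cyclic indexing into the flattened replication
theorem pvFlattenRep (s : List Char) (L : Nat) (hL : s.length = L) :
    ∀ (m k : Nat), k < m * L →
      ((List.replicate m s).flatten).getD k ' ' = s.getD (k % L) ' ' := by
  intro m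
  induction m with
  | zero => intro k hk; omega
  | succ m ih =>
    intro k hk
    rw [List.replicate_succ, List.flatten_cons]
    by_cases hkl : k < L
    · rw [List.getD_append _ _ _ _ (by omega), Nat.mod_eq_of_lt hkl]
    · rw [List.getD_append_right _ _ _ _ (by omega), hL, Nat.mod_eq_sub_mod (by omega)]
      have hml : (m + 1) * L = m * L + L := by ring
      exact ih (k - L) (by omega)

theorem pvLtDiv (n L : Nat) (h : 0 < L) : n < (n / L + 1) * L := by
  calc n = L * (n / L) + n % L := (Nat.div_add_mod n L).symm
    _ < L * (n / L) + L := by have := Nat.mod_lt n h; omega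
    _ = (n / L + 1) * L := by ring

-- repeat(s, l) is cyclic indexing: element p is s[p % len(s)]
theorem pvRepeat_eq_cyc (s : List Char) (l : Int) (hl : 0 ≤ l) (hs : s ≠ []) :
    pvRepeat s l = (List.range l.toNat).map (fun k => s.getD (k % s.length) ' ') := by
  rw [pvRepeat]
  have hL : 0 < s.length := List.length_pos_iff.mpr hs
  obtain ⟨n, rfl⟩ : ∃ n : Nat, l = (n : Int) := ⟨l.toNat, (Int.toNat_of_nonneg hl).symm⟩
  rw [PySem.List.slice_to_natCast, PySem.List.len_eq, PySem.Int.floordiv_natCast]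
  obtain ⟨q, hq⟩ : ∃ q, n / s.length = q := ⟨_, rfl⟩
  rw [hq]
  have hm : (((q : Int) + 1)).toNat = q + 1 := by omega
  rw [PySem.List.pyRepeat, hm]
  have hlen : ((List.replicate (q + 1) s).flatten).length = (q + 1) * s.length := by
    simp [List.length_flatten, Nat.mul_comm]
  have hn : n < (q + 1) * s.length := hq ▸ pvLtDiv n s.length hL
  apply List.ext_getElem
  · simp [hlen]; omega
  · intro k h1 h2
    have hk : k < n := by simpa using h2
    rw [List.getElem_take, List.getElem_map, List.getElem_range,
      ← List.getD_eq_getElem _ ' ']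
    exact pvFlattenRep s s.length rfl _ k (by omega)

-- B's comparison loop from position p compares the cyclic tails lexicographically
def pvCyc (s : List Char) (l p : Int) : List Char :=
  (PySem.List.pyRange p l 1).map (fun k => s.getD (k.toNat % s.length) ' ')

theorem pvGetMod (s : List Char) (p : Int) (hp : 0 ≤ p) :
    PySem.List.pyGetD s (PySem.Int.mod p (PySem.List.len s)) ' ' = s.getD (p.toNat % s.length) ' ' := by
  obtain ⟨m, rfl⟩ : ∃ m : Nat, p = (m : Int) := ⟨p.toNat, (Int.toNat_of_nonneg hp).symm⟩
  rw [PySem.List.len_eq, PySem.Int.mod_natCast, PySem.List.pyGetD_natCast]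
  simp

theorem pvCyc_cons (s : List Char) (l p : Int) (h : p < l) :
    pvCyc s l p = s.getD (p.toNat % s.length) ' ' :: pvCyc s l (p + 1) := by
  rw [pvCyc, PySem.List.pyRange_one_cons h, List.map_cons, ← pvCyc]

theorem pvLessAux_spec (sa sb : List Char) (l : Int) :
    ∀ (n : Nat) (p : Int), 0 ≤ p → (l - p).toNat = n →
      pvLessAux sa sb l p = decide (pvCyc sa l p < pvCyc sb l p) := by
  intro n
  induction n with
  | zero =>
    intro p hp hn
    rw [pvLessAux, dif_neg (by omega : ¬ p < l)]
    rw [pvCyc, pvCyc, PySem.List.pyRange_one_eq_nil (by omega)]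
    simp
  | succ n ih =>
    intro p hp hn
    have hpl : p < l := by omega
    rw [pvLessAux, dif_pos hpl]
    simp only [pvGetMod sa p hp, pvGetMod sb p hp]
    rw [pvCyc_cons sa l p hpl, pvCyc_cons sb l p hpl]
    set ca := sa.getD (p.toNat % sa.length) ' '
    set cb := sb.getD (p.toNat % sb.length) ' '
    by_cases hc : ca = cb
    · rw [if_neg (by simp [hc]), ih (p + 1) (by omega) (by omega)]
      rcases lt_trichotomy (pvCyc sa l (p+1)) (pvCyc sb l (p+1)) with h | h | h <;>
        simp [hc, h]
    · rw [if_pos (by simp [hc])]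
      by_cases hlt : ca < cb <;> simp [List.cons_lt_cons_iff, hc, hlt]

theorem pvCyc_zero (s : List Char) (l : Int) (hl : 0 ≤ l) (hs : s ≠ []) :
    pvCyc s l 0 = pvRepeat s l := by
  rw [pvCyc, PySem.List.pyRange_one, List.map_map, pvRepeat_eq_cyc s l hl hs, Int.sub_zero]
  apply List.map_congr_left
  intro k _
  simp

theorem pvLessAux_eq_repeat (sa sb : List Char) (ha : sa ≠ []) (hb : sb ≠ []) (l : Int)
    (hl : 0 ≤ l) : pvLessAux sa sb l 0 = decide (pvRepeat sa l < pvRepeat sb l) := by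
  rw [pvLessAux_spec sa sb l (l - 0).toNat 0 le_rfl rfl,
    pvCyc_zero sa l hl ha, pvCyc_zero sb l hl hb]

theorem pvGetDSet (P : List (List (List Char))) (m k : Nat) (v : List (List Char))
    (h : m < P.length) :
    (P.set m v).getD k [] = if k = m then v else P.getD k [] := by
  by_cases hk : k = m
  · subst hk; simp [List.getD_eq_getElem?_getD, h]
  · have hmk : m ≠ k := fun h' => hk h'.symm
    simp [List.getD_eq_getElem?_getD, hk, hmk]

-- the buckets after one row i of B's pass
theorem pvRow (matrix : List (List String)) (l i : Int) (hi0 : 0 ≤ i) (hil : i < l) :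
    ∀ (n : Nat) (j0 : Int) (P : List (List (List Char))),
      0 ≤ j0 → (l - j0).toNat = n → P.length = (2 * l - 1).toNat →
      ((PySem.List.pyRange j0 l 1).foldl
          (fun Q j => PySem.List.pySetD Q (l - 1 - i + j)
            (PySem.List.pyGetD Q (l - 1 - i + j) [] ++ [pvCell matrix i j])) P).length = P.length ∧
      ∀ k : Nat, k < (2 * l - 1).toNat →
        ((PySem.List.pyRange j0 l 1).foldl
          (fun Q j => PySem.List.pySetD Q (l - 1 - i + j)
            (PySem.List.pyGetD Q (l - 1 - i + j) [] ++ [pvCell matrix i j])) P).getD k [] =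
        P.getD k [] ++ (if l - 1 - i + j0 ≤ (k:Int) ∧ (k:Int) < 2 * l - 1 - i
          then [pvCell matrix i ((k:Int) - (l - 1 - i))] else []) := by
  intro n
  induction n with
  | zero =>
    intro j0 P hj0 hn hP
    rw [PySem.List.pyRange_one_eq_nil (by omega)]
    refine ⟨rfl, fun k hk => ?_⟩
    rw [List.foldl_nil, if_neg (by omega), List.append_nil]
  | succ n ih =>
    intro j0 P hj0 hn hP
    have hj0l : j0 < l := by omega
    rw [PySem.List.pyRange_one_cons hj0l, List.foldl_cons]
    have hidx0 : 0 ≤ l - 1 - i + j0 := by omega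
    have hidx1 : (l - 1 - i + j0).toNat < P.length := by omega
    rw [PySem.List.pySetD_of_nonneg _ _ hidx0]
    set m : Nat := (l - 1 - i + j0).toNat with hm
    set v : List (List Char) :=
      PySem.List.pyGetD P (l - 1 - i + j0) [] ++ [pvCell matrix i j0] with hv
    obtain ⟨ihlen, ihget⟩ := ih (j0 + 1) (P.set m v) (by omega) (by omega) (by simpa using hP)
    refine ⟨by rw [ihlen]; simp, fun k hk => ?_⟩
    rw [ihget k hk, pvGetDSet P m k v hidx1]
    by_cases hkm : k = m
    · subst hkm
      rw [if_pos rfl, if_neg (by omega), if_pos (by omega), List.append_nil, hv,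
        PySem.List.pyGetD_eq_getElem P [] hidx0 (by omega), ← List.getD_eq_getElem P []]
      have hmi : ((m : Int)) = l - 1 - i + j0 := by omega
      rw [hmi, show l - 1 - i + j0 - (l - 1 - i) = j0 from by ring]
    · rw [if_neg hkm]
      by_cases hc : l - 1 - i + j0 ≤ (k:Int) ∧ (k:Int) < 2 * l - 1 - i
      · rw [if_pos hc, if_pos (by omega)]
      · rw [if_neg hc, if_neg (by omega)]

-- the diagonal-d cells among rows < r
def pvCellsUpTo (matrix : List (List String)) (l d r : Int) : List (List Char) :=
  (PySem.List.pyRange (max 0 (l - d)) (min r (min l (2 * l - d))) 1).map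
    (fun t => pvCell matrix t (t - (l - d)))

theorem pvUpToSucc (matrix : List (List String)) (l d i0 : Int) (h0 : 0 ≤ i0) (hl : i0 < l) :
    pvCellsUpTo matrix l d (i0 + 1) = pvCellsUpTo matrix l d i0 ++
      (if l - d ≤ i0 ∧ i0 < 2 * l - d then [pvCell matrix i0 (i0 - (l - d))] else []) := by
  unfold pvCellsUpTo
  by_cases hc : l - d ≤ i0 ∧ i0 < 2 * l - d
  · rw [if_pos hc,
      show min (i0 + 1) (min l (2 * l - d)) = i0 + 1 from by omega,
      show min i0 (min l (2 * l - d)) = i0 from by omega,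
      PySem.List.pyRange_one_succ_right (by omega), List.map_append, List.map_singleton]
  · rw [if_neg hc, List.append_nil]
    rcases (by omega : i0 < l - d ∨ 2 * l - d ≤ i0) with h | h
    · rw [PySem.List.pyRange_one_eq_nil (by omega), PySem.List.pyRange_one_eq_nil (by omega)]
    · rw [show min (i0 + 1) (min l (2 * l - d)) = min i0 (min l (2 * l - d)) from by omega]

-- B's whole double loop fills every bucket with its diagonal's cells, top to bottom
theorem pvOuter (matrix : List (List String)) (l : Int) :
    ∀ (n : Nat) (i0 : Int) (P : List (List (List Char))),
      0 ≤ i0 → (l - i0).toNat = n → P.length = (2 * l - 1).toNat →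
      (∀ k : Nat, k < (2 * l - 1).toNat → P.getD k [] = pvCellsUpTo matrix l ((k:Int) + 1) i0) →
      ((PySem.List.pyRange i0 l 1).foldl (fun P i =>
            (PySem.List.pyRange 0 l 1).foldl
              (fun Q j => PySem.List.pySetD Q (l - 1 - i + j)
                (PySem.List.pyGetD Q (l - 1 - i + j) [] ++ [pvCell matrix i j])) P) P).length = P.length ∧
      ∀ k : Nat, k < (2 * l - 1).toNat →
        ((PySem.List.pyRange i0 l 1).foldl (fun P i =>
            (PySem.List.pyRange 0 l 1).foldl
              (fun Q j => PySem.List.pySetD Q (l - 1 - i + j)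
                (PySem.List.pyGetD Q (l - 1 - i + j) [] ++ [pvCell matrix i j])) P) P).getD k [] =
        pvDiagCells matrix l ((k:Int) + 1) := by
  intro n
  induction n with
  | zero =>
    intro i0 P h0 hn hP hinv
    rw [PySem.List.pyRange_one_eq_nil (a := i0) (b := l) (by omega), List.foldl_nil]
    refine ⟨rfl, fun k hk => ?_⟩
    rw [hinv k hk]
    unfold pvCellsUpTo pvDiagCells
    rw [show min i0 (min l (2 * l - ((k:Int) + 1))) = min l (2 * l - ((k:Int) + 1)) from by omega]
  | succ n ih =>
    intro i0 P h0 hn hP hinv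
    have hi0l : i0 < l := by omega
    rw [PySem.List.pyRange_one_cons (a := i0) (b := l) hi0l, List.foldl_cons]
    obtain ⟨rlen, rget⟩ := pvRow matrix l i0 h0 hi0l (l - 0).toNat 0 P (le_refl 0) rfl hP
    obtain ⟨hlen2, hget2⟩ := ih (i0 + 1)
      ((PySem.List.pyRange 0 l 1).foldl
        (fun Q j => PySem.List.pySetD Q (l - 1 - i0 + j)
          (PySem.List.pyGetD Q (l - 1 - i0 + j) [] ++ [pvCell matrix i0 j])) P)
      (by omega) (by omega) (by rw [rlen, hP])
      (fun k' hk' => by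
        rw [rget k' hk', hinv k' hk', pvUpToSucc matrix l ((k':Int) + 1) i0 h0 hi0l]
        congr 1
        by_cases hc : l - 1 - i0 + 0 ≤ (k':Int) ∧ (k':Int) < 2 * l - 1 - i0
        · rw [if_pos hc, if_pos (by omega),
            show i0 - (l - ((k':Int) + 1)) = (k':Int) - (l - 1 - i0 - 0) from by ring]
          norm_num
        · rw [if_neg hc, if_neg (by omega)])
    exact ⟨by rw [hlen2, rlen], hget2⟩

-- under Pre_, every diagonal string is nonempty
theorem pvDiag_ne (matrix : List (List String)) (pre : Pre_solution matrix) (d : Int)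
    (hd1 : 1 ≤ d) (hd2 : d < 2 * ((matrix.headD []).length : Int)) :
    pvDiagStr matrix ((matrix.headD []).length : Int) d ≠ [] := by
  set L : Nat := (matrix.headD []).length with hLdef
  obtain ⟨-, -, -, h4⟩ := pre
  obtain ⟨iN, hiN, jN, hjN, hij, hne⟩ :=
    h4 (d - 1).toNat (List.mem_range.mpr (by omega))
  rw [List.mem_range] at hiN hjN
  have hd : ((d - 1).toNat : Int) + 1 = d := by omega
  rw [hd] at hij
  intro hflat
  have hall := (List.flatten_eq_nil_iff).mp hflat
  have hmem : pvCell matrix (iN : Int) ((iN : Int) - ((L:Int) - d)) ∈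
      pvDiagCells matrix (L:Int) d := by
    exact List.mem_map_of_mem (a := (iN : Int))
      (PySem.List.mem_pyRange_one.mpr ⟨by omega, by omega⟩)
  have hcell := hall _ hmem
  rw [show (iN : Int) - ((L:Int) - d) = (jN : Int) from by omega] at hcell
  rw [pvCell, PySem.List.pyGetD_natCast, PySem.List.pyGetD_natCast] at hcell
  exact hne (String.toList_inj.mp (by simpa using hcell))

-- insertBy only looks at comparisons of the inserted element with list members
theorem pvInsertBy_congr {α : Type} (p q : α → α → Bool) (x : α) :
    ∀ ys : List α, (∀ y ∈ ys, p x y = q x y) →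
      PySem.List.insertBy p x ys = PySem.List.insertBy q x ys := by
  intro ys
  induction ys with
  | nil => intro _; rfl
  | cons y t ih =>
    intro h
    simp only [PySem.List.insertBy]
    rw [h y List.mem_cons_self, ih (fun z hz => h z (List.mem_cons_of_mem _ hz))]

theorem pvFoldInsert_congr {α : Type} (p q : α → α → Bool) (R : List α)
    (h : ∀ a ∈ R, ∀ b ∈ R, p a b = q a b) :
    ∀ (xs : List α), (∀ a ∈ xs, a ∈ R) → ∀ (acc : List α), (∀ b ∈ acc, b ∈ R) →
      xs.foldl (fun ord d => PySem.List.insertBy p d ord) acc =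
      xs.foldl (fun ord d => PySem.List.insertBy q d ord) acc := by
  intro xs
  induction xs with
  | nil => intro _ acc _; rfl
  | cons x t ih =>
    intro hxs acc hacc
    simp only [List.foldl_cons]
    rw [pvInsertBy_congr p q x acc (fun y hy => h x (hxs x List.mem_cons_self) y (hacc y hy)),
      ih (fun a ha => hxs a (List.mem_cons_of_mem _ ha)) _
        (fun b hb => by
          rcases (PySem.List.mem_insertBy _ _ _ _).mp hb with h1 | h1
          · exact h1 ▸ hxs x List.mem_cons_self
          · exact hacc b h1)]

-- B equals the same named sorted form
theorem pvB_eq (matrix : List (List String)) (pre : Pre_solution matrix) :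
    solution_alt matrix =
      PySem.List.sorted (PySem.List.pyRange 1 (2 * PySem.List.len (PySem.List.pyGetD matrix 0 [])) 1)
        (fun d => pvRepeat (pvDiagStr matrix (PySem.List.len (PySem.List.pyGetD matrix 0 [])) d)
          (PySem.List.len (PySem.List.pyGetD matrix 0 []))) false := by
  unfold solution_alt
  simp only [PySem.List.len_eq]
  have hhead : PySem.List.pyGetD matrix 0 [] = matrix.headD [] := by
    cases matrix <;> simp [PySem.List.pyGetD_zero]
  rw [hhead]
  set L : Nat := (matrix.headD []).length with hL
  rw [PySem.List.sorted_eq_foldl_insertBy]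
  obtain ⟨plen, pget⟩ := pvOuter matrix (L:Int) ((L:Int) - 0).toNat 0
    (List.replicate (2 * (L:Int) - 1).toNat []) le_rfl rfl (by simp)
    (fun k hk => by
      rw [pvCellsUpTo, PySem.List.pyRange_one_eq_nil (by omega), List.map_nil]
      rw [List.getD_eq_getElem?_getD, List.getElem?_replicate]
      split <;> rfl)
  have hstr : ∀ c : Int, 1 ≤ c → c < 2 * (L:Int) →
      PySem.List.pyGetD
        (((PySem.List.pyRange 0 (L:Int) 1).foldl (fun P i =>
            (PySem.List.pyRange 0 (L:Int) 1).foldl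
              (fun Q j => PySem.List.pySetD Q ((L:Int) - 1 - i + j)
                (PySem.List.pyGetD Q ((L:Int) - 1 - i + j) [] ++ [pvCell matrix i j])) P)
          (List.replicate (2 * (L:Int) - 1).toNat [])).map (PySem.Chars.join []))
        (c - 1) [] = pvDiagStr matrix (L:Int) c := by
    intro c hc1 hc2
    set parts := (PySem.List.pyRange 0 (L:Int) 1).foldl (fun P i =>
            (PySem.List.pyRange 0 (L:Int) 1).foldl
              (fun Q j => PySem.List.pySetD Q ((L:Int) - 1 - i + j)
                (PySem.List.pyGetD Q ((L:Int) - 1 - i + j) [] ++ [pvCell matrix i j])) P)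
          (List.replicate (2 * (L:Int) - 1).toNat []) with hparts
    have hplen : parts.length = (2 * (L:Int) - 1).toNat := by
      rw [hparts, plen, List.length_replicate]
    have hm : (c - 1) = (((c - 1).toNat : Nat) : Int) := by omega
    have hmlt : (c - 1).toNat < parts.length := by omega
    rw [hm, PySem.List.pyGetD_natCast,
      List.getD_eq_getElem _ _ (by simpa using hmlt), List.getElem_map,
      ← List.getD_eq_getElem parts [],
      pget (c - 1).toNat (by omega),
      show (((c - 1).toNat : Nat) : Int) + 1 = c from by omega,
      pvJoin_nil, ← pvDiagStr]
  exact pvFoldInsert_congr _ _ (PySem.List.pyRange 1 (2 * (L:Int)) 1)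
    (fun a ha b hb => by
      rw [PySem.List.mem_pyRange_one] at ha hb
      have hane := pvDiag_ne matrix pre a ha.1 (by omega)
      have hbne := pvDiag_ne matrix pre b hb.1 (by omega)
      rw [pvLess, hstr a ha.1 ha.2, hstr b hb.1 hb.2,
        pvLessAux_eq_repeat _ _ hane hbne (L:Int) (by omega)])
    _ (fun a ha => ha) [] (fun b hb => by simp at hb)

-- ===== VERDICT (by name: the statement is the Claim_ definition above) =====
theorem solution_spec : Claim_equal_solution := by
  intro matrix _dom pre
  unfold Spec_solution
  rw [pvA_eq, pvB_eq matrix pre]
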